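/- GENERATED by tools/from_farm_form.py from prooffarm-gif/accepted/DGifCloseFile.1/Proof.lean (a worked proof of the farm's unit `DGifCloseFile.1`,
   accepted by the verdict) — do not edit. -/
import Gif.Spec.Units.DGifCloseFile_1
import Gif.Spec.AllSegs
import Gif.Spec.Proved.DGifCloseFile_1_Lemmas

open X86 X86.User Asan ProgX.Base ProgX.Base.Spec Gif.Spec

/-!
  `DGifCloseFile.1` (0x109c60 … 0x109cb5, 23 instructions; dgif_lib.c:683-692): the prologue of `DGifCloseFile`, the two dead NULL
  tests of l.686, and `if (GifFile->Image.ColorMap) { GifFreeMapObject(…); GifFile->Image.ColorMap = NULL; }`. The value the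
  checked load of `gif.Image.ColorMap` delivers is decided by the forest's `icm` component: the segment is proved once per case
  (Lemmas.lean: `cf1_none`, `cf1_some`), and the callee's contract is instantiated with the map's ghosts here.
-/

/-- Segment 1 of `DGifCloseFile` takes the function's entry to `Ok` at 0x109cb5 with the forest `noIcm F`. -/
theorem Gif.Spec.Proved.DGifCloseFile_1_ok : Gif.Spec.DGifCloseFile_1.Statement := by
  intro Lay hLay μ hμ u₀ hcode h_asan_load8_noabort h_GifFreeMapObject h_asan_store8_noabort H rest frames F R e ret he hpre
  cases hicm : F.icm with
  | none =>
    -- dgif_lib.c:690 `GifFile->Image.ColorMap == NULL`: nothing to free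
    exact Gif.Spec.DGifCloseFile_1.cf1_none Lay hLay μ hμ u₀ hcode h_asan_load8_noabort H rest frames F R e ret he hpre hicm
  | some mp =>
    -- dgif_lib.c:690-692 the map `mp` is freed: GifFreeMapObject's contract for the colour array `(mp.colors, 3 * mp.count)`
    have hfree := h_GifFreeMapObject H rest frames mp.colors (3 * mp.count)
    exact Gif.Spec.DGifCloseFile_1.cf1_some Lay hLay μ hμ u₀ hcode h_asan_load8_noabort h_asan_store8_noabort H rest frames F R
      e ret mp hfree he hpre hicm
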